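-- pv_equiv track=rewrite | github.com/kroker42/AoC2020 | langs.py | get_possible_allergens
-- ===== SOURCE A (Python) =====
-- def get_possible_allergens(foods):
--     allergens = dict()
--     ingredients = dict()
--
--     for f in foods:
--         for i in f[0]:
--             if i in ingredients:
--                 ingredients[i] += 1
--             else:
--                 ingredients[i] = 1
--
--         ingr = set(f[0])
--         for a in f[1]:
--             if a in allergens:
--                 allergens[a] = allergens[a].intersection(ingr)
--             else:
--                 allergens[a] = ingr
--
--     return allergens, ingredients
-- ===== SOURCE B (Python) =====
-- def get_possible_allergens(foods):
--     ingredients = {}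
--     sets_by_allergen = {}
--     for f in foods:
--         for i in f[0]:
--             ingredients[i] = ingredients.get(i, 0) + 1
--         s = set(f[0])
--         for a in f[1]:
--             sets_by_allergen.setdefault(a, []).append(s)
--     allergens = {a: sets[0].intersection(*sets[1:])
--                  for a, sets in sets_by_allergen.items()}
--     return allergens, ingredients
-- ===== Notes on version B (the rewrite author's own statement) =====
-- stated objective: alternative
-- what changed: Instead of keeping a running intersection per allergen, B indexes each allergen to the list of ingredient sets of the foods mentioning it and reduces each list with one set.intersection(*sets) in a second pass; ingredient counting uses dict.get instead of a membership branch.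
import Mathlib
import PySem

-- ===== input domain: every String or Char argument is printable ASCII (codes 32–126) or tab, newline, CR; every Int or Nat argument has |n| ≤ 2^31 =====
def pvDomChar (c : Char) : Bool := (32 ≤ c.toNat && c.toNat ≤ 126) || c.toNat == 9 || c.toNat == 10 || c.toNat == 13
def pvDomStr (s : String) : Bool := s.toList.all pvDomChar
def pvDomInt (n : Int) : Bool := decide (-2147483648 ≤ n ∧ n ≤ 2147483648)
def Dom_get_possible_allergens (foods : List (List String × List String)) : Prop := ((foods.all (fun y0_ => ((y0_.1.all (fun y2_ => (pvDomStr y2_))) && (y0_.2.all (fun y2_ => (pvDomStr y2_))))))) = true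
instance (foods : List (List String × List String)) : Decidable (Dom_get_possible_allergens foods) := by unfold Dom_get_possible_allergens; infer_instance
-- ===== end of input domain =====

-- B replaces A's running per-allergen intersection with an index of allergen → list of
-- ingredient sets, reduced by a single intersection per allergen in a second pass (alternative
-- decomposition, same cost; return value only).

-- ===== PORT A =====
def get_possible_allergens (foods : List (List String × List String)) :
    (List (String × List String)) × (List (String × Int)) :=
  let st := foods.foldl
    (fun (st : PySem.Dict String (PySem.Set String) × PySem.Dict String Int) f =>
      let ingredients := f.1.foldl
        (fun d i => if d.contains i then d.insert i (d.getD i 0 + 1) else d.insert i 1) st.2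
      let ingr : PySem.Set String := PySem.Set.ofList f.1
      let allergens := f.2.foldl
        (fun d a => if d.contains a then d.insert a (PySem.Set.inter (d.getD a []) ingr)
                    else d.insert a ingr) st.1
      (allergens, ingredients))
    (PySem.Dict.empty, PySem.Dict.empty)
  (st.1.items, st.2.items)

-- ===== PORT B =====
-- set.intersection(*sets) for the nonempty list sets = sets[0] ∩ sets[1] ∩ …
def pvInterAll (l : List (PySem.Set String)) : PySem.Set String :=
  match l with
  | [] => []
  | h :: t => t.foldl PySem.Set.inter h

def get_possible_allergens_alt (foods : List (List String × List String)) :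
    (List (String × List String)) × (List (String × Int)) :=
  let st := foods.foldl
    (fun (st : PySem.Dict String Int × PySem.Dict String (List (PySem.Set String))) f =>
      let ingredients := f.1.foldl (fun d i => d.insert i (d.getD i 0 + 1)) st.1
      let s : PySem.Set String := PySem.Set.ofList f.1
      let sets := f.2.foldl (fun d a => d.insert a (d.getD a [] ++ [s])) st.2
      (ingredients, sets))
    (PySem.Dict.empty, PySem.Dict.empty)
  let allergens := st.2.items.map (fun p => (p.1, pvInterAll p.2))
  (allergens, st.1.items)

-- ===== PRECONDITION & SPEC =====
def Spec_get_possible_allergens (foods : List (List String × List String)) (out : (List (String × List String)) × (List (String × Int))) : Prop := out = get_possible_allergens_alt foods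
instance (foods : List (List String × List String)) (out : (List (String × List String)) × (List (String × Int))) : Decidable (Spec_get_possible_allergens foods out) := by unfold Spec_get_possible_allergens; infer_instance

-- ===== CLAIM (what is proved, stated in full; the proofs are below) =====
def Claim_equal_get_possible_allergens : Prop := ∀ (foods : List (List String × List String)), Dom_get_possible_allergens foods → Spec_get_possible_allergens foods (get_possible_allergens foods)

-- ===== LEMMAS AND PROOFS =====

-- B's sets-dict mapped through pvInterAll, value by value
def pvMapVals (d : PySem.Dict String (List (PySem.Set String))) : PySem.Dict String (PySem.Set String) :=
  PySem.Dict.mk (d.items.map (fun p => (p.1, pvInterAll p.2)))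

theorem pv_items_mapVals (d : PySem.Dict String (List (PySem.Set String))) :
    (pvMapVals d).items = d.items.map (fun p => (p.1, pvInterAll p.2)) := rfl

theorem pv_get?_mapVals (d : PySem.Dict String (List (PySem.Set String))) (a : String) :
    (pvMapVals d).get? a = (d.get? a).map pvInterAll := by
  obtain ⟨l⟩ := d
  induction l with
  | nil => simp [pvMapVals, PySem.Dict.get?]
  | cons p t ih =>
      obtain ⟨k, v⟩ := p
      simp only [pvMapVals, List.map_cons, PySem.Dict.get?_mk_cons]
      by_cases h : (k == a) = true
      · simp [h]
      · simp only [h, Bool.false_eq_true, if_false]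
        simpa [pvMapVals] using ih

theorem pv_interAll_append (l : List (PySem.Set String)) (hl : l ≠ []) (s : PySem.Set String) :
    pvInterAll (l ++ [s]) = PySem.Set.inter (pvInterAll l) s := by
  cases l with
  | nil => simp at hl
  | cons h t => simp [pvInterAll, List.foldl_append]

-- the inner-loop step: A's incremental intersection vs B's list-append, through pvMapVals
theorem pv_step (dB : PySem.Dict String (List (PySem.Set String)))
    (hne : ∀ p ∈ dB.items, p.2 ≠ []) (a : String) (s : PySem.Set String) :
    (if (pvMapVals dB).contains a then
        (pvMapVals dB).insert a (PySem.Set.inter ((pvMapVals dB).getD a []) s)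
      else (pvMapVals dB).insert a s)
    = pvMapVals (dB.insert a (dB.getD a [] ++ [s])) := by
  have hc : (pvMapVals dB).contains a = dB.contains a := by
    rw [PySem.Dict.contains_eq_isSome_get?, PySem.Dict.contains_eq_isSome_get?,
      pv_get?_mapVals]
    cases dB.get? a <;> rfl
  by_cases h : dB.contains a = true
  · -- key present: overwrite in place on both sides
    obtain ⟨l, hl⟩ : ∃ l, dB.get? a = some l := by
      rw [PySem.Dict.contains_eq_isSome_get?] at h
      cases hget : dB.get? a with
      | none => rw [hget] at h; simp at h
      | some l => exact ⟨l, rfl⟩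
    have hlne : l ≠ [] := by
      have hmem : (a, l) ∈ dB.items := PySem.Dict.mem_items_of_get?_eq_some dB hl
      exact hne _ hmem
    have hgD : dB.getD a [] = l := PySem.Dict.getD_of_get?_eq_some dB [] hl
    have hgDA : (pvMapVals dB).getD a [] = pvInterAll l := by
      rw [PySem.Dict.getD_eq_get?_getD, pv_get?_mapVals, hl]; rfl
    rw [hc, if_pos h, hgD, hgDA]
    -- compare the items lists
    apply PySem.Dict.ext
    rw [PySem.Dict.items_insert, pv_items_mapVals (dB.insert a (l ++ [s])),
      PySem.Dict.items_insert, hc, if_pos h, if_pos h, pv_items_mapVals]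
    simp only [List.map_map]
    apply List.map_congr_left
    intro p _
    by_cases hp : (p.1 == a) = true <;>
      simp [hp, Function.comp, pv_interAll_append l hlne s]
  · -- new key: append on both sides
    have h' : dB.contains a = false := by simpa using h
    have hgD : dB.getD a [] = [] := PySem.Dict.getD_of_not_contains dB [] h'
    rw [hc, if_neg (by simp [h']), hgD]
    apply PySem.Dict.ext
    rw [PySem.Dict.items_insert, pv_items_mapVals (dB.insert a ([] ++ [s])),
      PySem.Dict.items_insert, hc, h', if_neg (by simp), if_neg (by simp), pv_items_mapVals]
    simp [pvInterAll]

theorem pv_step_ne (dB : PySem.Dict String (List (PySem.Set String)))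
    (hne : ∀ p ∈ dB.items, p.2 ≠ []) (a : String) (s : PySem.Set String) :
    ∀ p ∈ (dB.insert a (dB.getD a [] ++ [s])).items, p.2 ≠ [] := by
  intro p hp
  rcases (PySem.Dict.mem_items_insert dB a (dB.getD a [] ++ [s]) p).1 hp with h | h
  · subst h; simp
  · exact hne _ h.1

-- inner fold over the allergen list of one food
theorem pv_inner (as : List String) (s : PySem.Set String)
    (dB : PySem.Dict String (List (PySem.Set String))) (hne : ∀ p ∈ dB.items, p.2 ≠ []) :
    (as.foldl (fun d a => if d.contains a then d.insert a (PySem.Set.inter (d.getD a []) s)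
        else d.insert a s) (pvMapVals dB)
      = pvMapVals (as.foldl (fun d a => d.insert a (d.getD a [] ++ [s])) dB))
    ∧ ∀ p ∈ (as.foldl (fun d a => d.insert a (d.getD a [] ++ [s])) dB).items, p.2 ≠ [] := by
  induction as generalizing dB with
  | nil => exact ⟨rfl, hne⟩
  | cons a t ih =>
      simp only [List.foldl_cons]
      rw [pv_step dB hne a s]
      exact ih _ (pv_step_ne dB hne a s)

-- A's ingredient-count update equals B's
theorem pv_count_fun :
    (fun (d : PySem.Dict String Int) i =>
        if d.contains i then d.insert i (d.getD i 0 + 1) else d.insert i 1)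
    = fun (d : PySem.Dict String Int) i => d.insert i (d.getD i 0 + 1) := by
  funext d i
  by_cases h : d.contains i = true
  · simp [h]
  · have h' : d.contains i = false := by simpa using h
    rw [if_neg (by simp [h']), PySem.Dict.getD_of_not_contains d 0 h']
    norm_num

-- ===== VERDICT (by name: the statement is the Claim_ definition above) =====
theorem get_possible_allergens_spec : Claim_equal_get_possible_allergens := by
  intro foods _
  unfold Spec_get_possible_allergens get_possible_allergens get_possible_allergens_alt
  rw [pv_count_fun]
  -- generalize over the fold states
  suffices h : ∀ (foods : List (List String × List String))
      (dB : PySem.Dict String (List (PySem.Set String))) (dI : PySem.Dict String Int),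
      (∀ p ∈ dB.items, p.2 ≠ []) →
      foods.foldl
        (fun (st : PySem.Dict String (PySem.Set String) × PySem.Dict String Int) f =>
          (f.2.foldl (fun d a => if d.contains a then
              d.insert a (PySem.Set.inter (d.getD a []) (PySem.Set.ofList f.1))
            else d.insert a (PySem.Set.ofList f.1)) st.1,
           f.1.foldl (fun d i => d.insert i (d.getD i 0 + 1)) st.2))
        (pvMapVals dB, dI)
      = (fun st : PySem.Dict String Int × PySem.Dict String (List (PySem.Set String)) =>
          (pvMapVals st.2, st.1))
        (foods.foldl
          (fun (st : PySem.Dict String Int × PySem.Dict String (List (PySem.Set String))) f =>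
            (f.1.foldl (fun d i => d.insert i (d.getD i 0 + 1)) st.1,
             f.2.foldl (fun d a => d.insert a (d.getD a [] ++ [PySem.Set.ofList f.1])) st.2))
          (dI, dB)) by
    have hE : pvMapVals PySem.Dict.empty = PySem.Dict.empty := rfl
    have key := h foods PySem.Dict.empty PySem.Dict.empty
      (by intro p hp; simp [PySem.Dict.empty] at hp)
    rw [hE] at key
    simp only [key, pvMapVals]
  intro foods
  induction foods with
  | nil => intro dB dI _; rfl
  | cons f t ih =>
      intro dB dI hne
      simp only [List.foldl_cons]
      obtain ⟨heq, hne'⟩ := pv_inner f.2 (PySem.Set.ofList f.1) dB hne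
      rw [heq]
      exact ih _ _ hne'
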